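-- pv_equiv track=rewrite | github.com/x24yang0104/Algorithm_Data_Structure | BFS + Union Find/Sequence Reconstruction.py | get_indegree_and_neighbors
-- ===== SOURCE A (Python) =====
-- def get_indegree_and_neighbors(n, seqs):
--     indegree = {}
--     neighbor = {}
--     for seq in seqs:
--         for i in range(len(seq)):
--             if not indegree.get(seq[i]):
--                 indegree[seq[i]] = 0
--             if i > 0:
--                 indegree[seq[i]] += 1
--             if not neighbor.get(seq[i]):
--                 neighbor[seq[i]] = []
--             if i < len(seq) - 1:
--                 neighbor[seq[i]].append(seq[i + 1])
--     return indegree, neighbor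
-- ===== SOURCE B (Python) =====
-- def get_indegree_and_neighbors(n, seqs):
--     indegree = {}
--     neighbor = {}
--     # pass 1: register every element in first-encounter order
--     for seq in seqs:
--         for x in seq:
--             if x not in indegree:
--                 indegree[x] = 0
--                 neighbor[x] = []
--     # pass 2: adjacency lists, in encounter order, duplicates kept
--     for seq in seqs:
--         for a, b in zip(seq, seq[1:]):
--             neighbor[a].append(b)
--     # pass 3: indegrees derived from the adjacency
--     for node in neighbor:
--         for t in neighbor[node]:
--             indegree[t] += 1
--     return indegree, neighbor
-- ===== Notes on version B (the rewrite author's own statement) =====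
-- stated objective: alternative
-- what changed: A computes indegrees and successor lists together in one position-indexed loop with truthiness-guarded re-initialisation; B splits the work into three plain passes: register every element once, build the adjacency lists from zipped consecutive pairs, then derive every indegree from the adjacency by counting incoming edges.
import Mathlib
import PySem

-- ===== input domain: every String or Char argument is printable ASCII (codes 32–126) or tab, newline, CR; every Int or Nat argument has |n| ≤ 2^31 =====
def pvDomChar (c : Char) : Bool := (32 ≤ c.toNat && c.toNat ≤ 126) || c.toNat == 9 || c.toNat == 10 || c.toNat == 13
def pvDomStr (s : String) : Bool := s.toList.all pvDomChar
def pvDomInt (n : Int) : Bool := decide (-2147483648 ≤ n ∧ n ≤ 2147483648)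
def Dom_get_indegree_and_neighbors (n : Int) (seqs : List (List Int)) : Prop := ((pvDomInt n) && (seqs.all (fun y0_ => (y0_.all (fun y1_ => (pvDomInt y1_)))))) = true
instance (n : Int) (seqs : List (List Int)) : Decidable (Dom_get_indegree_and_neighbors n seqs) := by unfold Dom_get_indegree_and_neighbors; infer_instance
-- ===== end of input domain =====

-- B replaces A's single position-indexed loop by three plain passes (register keys, build adjacency
-- from zipped pairs, derive indegrees from the adjacency); same cost, different decomposition.

-- ===== PORT A =====
-- Exact notes: 'not indegree.get(x)' is True iff the lookup yields None or 0, i.e. iff get?.getD 0 == 0;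
-- 'not neighbor.get(x)' likewise iff None or []. 'indegree[seq[i]] += 1' and 'neighbor[seq[i]].append(...)'
-- always find the key present (it was just initialised), so Dict.modify is exact here.
def get_indegree_and_neighbors (n : Int) (seqs : List (List Int)) :
    (List (Int × Int)) × (List (Int × List Int)) :=
  let st := seqs.foldl (fun st seq =>
    (PySem.List.pyRange 0 (seq.length : Int) 1).foldl (fun st i =>
      let v := PySem.List.pyGetD seq i 0
      let ind := if (st.1.get? v).getD 0 == 0 then st.1.insert v 0 else st.1
      let ind := if 0 < i then ind.modify v 0 (· + 1) else ind
      let nb := if (st.2.get? v).getD [] == ([] : List Int) then st.2.insert v [] else st.2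
      let nb := if i < (seq.length : Int) - 1 then
          nb.modify v [] (· ++ [PySem.List.pyGetD seq (i + 1) 0]) else nb
      (ind, nb)) st)
    ((PySem.Dict.empty : PySem.Dict Int Int), (PySem.Dict.empty : PySem.Dict Int (List Int)))
  (st.1.items, st.2.items)

-- ===== PORT B =====
-- zip(seq, seq[1:]) is seq.zip seq.tail; 'for node in neighbor' iterates the keys in insertion order.
def get_indegree_and_neighbors_alt (n : Int) (seqs : List (List Int)) :
    (List (Int × Int)) × (List (Int × List Int)) :=
  let st := seqs.foldl (fun st seq => seq.foldl (fun st x =>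
      if st.1.contains x then st else (st.1.insert x 0, st.2.insert x ([] : List Int))) st)
    ((PySem.Dict.empty : PySem.Dict Int Int), (PySem.Dict.empty : PySem.Dict Int (List Int)))
  let nb := seqs.foldl (fun nb seq => (seq.zip seq.tail).foldl
      (fun nb p => nb.modify p.1 [] (· ++ [p.2])) nb) st.2
  let ind := nb.keys.foldl (fun ind k =>
      (nb.getD k []).foldl (fun ind t => ind.modify t 0 (· + 1)) ind) st.1
  (ind.items, nb.items)

-- ===== PRECONDITION & SPEC =====
def Spec_get_indegree_and_neighbors (n : Int) (seqs : List (List Int)) (out : (List (Int × Int)) × (List (Int × List Int))) : Prop := out = get_indegree_and_neighbors_alt n seqs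
instance (n : Int) (seqs : List (List Int)) (out : (List (Int × Int)) × (List (Int × List Int))) : Decidable (Spec_get_indegree_and_neighbors n seqs out) := by unfold Spec_get_indegree_and_neighbors; infer_instance

-- ===== CLAIM (what is proved, stated in full; the proofs are below) =====
def Claim_equal_get_indegree_and_neighbors : Prop := ∀ (n : Int) (seqs : List (List Int)), Dom_get_indegree_and_neighbors n seqs → Spec_get_indegree_and_neighbors n seqs (get_indegree_and_neighbors n seqs)

-- ===== LEMMAS AND PROOFS =====

-- the consecutive-pair ("edge") list of one sequence, and of all sequences
def pvZp (s : List Int) : List (Int × Int) := s.zip s.tail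
def pvE (ss : List (List Int)) : List (Int × Int) := ss.flatMap pvZp

-- canonical characterisation of the two dicts: keys are the distinct elements in first-encounter
-- order; the indegree of x is how often x occurs in the increment list cs; the neighbor list of x
-- is the list of targets of edges leaving x, in order.
def pvIndInv (ks : List Int) (cs : List Int) (d : PySem.Dict Int Int) : Prop :=
  d.keys = PySem.List.dedup ks ∧ ∀ x : Int, d.getD x 0 = (cs.count x : Int)

def pvNbInv (ks : List Int) (es : List (Int × Int)) (d : PySem.Dict Int (List Int)) : Prop :=
  d.keys = PySem.List.dedup ks ∧ ∀ x : Int, d.getD x [] = (es.filter (fun p => p.1 == x)).map Prod.snd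

theorem pv_dict_eq_of_keys_getD {ν : Type} (d d' : PySem.Dict Int ν) (dflt : ν)
    (hnd : d.keys.Nodup) (hk : d.keys = d'.keys)
    (hv : ∀ x, d.getD x dflt = d'.getD x dflt) : d = d' := by
  apply PySem.Dict.ext
  rw [PySem.Dict.items_eq_map_keys d hnd dflt, PySem.Dict.items_eq_map_keys d' (hk ▸ hnd) dflt,
    ← hk]
  exact List.map_congr_left fun k _ => by rw [hv]

theorem pv_insert_eq_self {ν : Type} (d : PySem.Dict Int ν) (k : Int) (v : ν)
    (hnd : d.keys.Nodup) (h : d.get? k = some v) : d.insert k v = d := by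
  have hc : d.contains k = true := by rw [PySem.Dict.contains_eq_isSome_get?, h]; rfl
  apply PySem.Dict.ext
  rw [PySem.Dict.items_insert_of_contains d v hc]
  conv_rhs => rw [← List.map_id d.items]
  refine List.map_congr_left fun p hp => ?_
  by_cases hpk : p.1 = k
  · have hg : d.get? p.1 = some p.2 := PySem.Dict.get?_of_mem_items d (by simpa using hp) hnd
    rw [hpk, h] at hg
    have hv2 : v = p.2 := Option.some_inj.mp hg
    simp [← hpk, hv2]
  · simp [hpk]

theorem pv_dedup_append_mem (ks : List Int) (x : Int) (h : x ∈ ks) :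
    PySem.List.dedup (ks ++ [x]) = PySem.List.dedup ks := by
  rw [PySem.List.dedup_eq_ofList, PySem.List.dedup_eq_ofList, PySem.Set.ofList_append_singleton,
    PySem.Set.add_of_mem ((PySem.Set.mem_ofList ks x).mpr h)]

theorem pv_dedup_append_not_mem (ks : List Int) (x : Int) (h : x ∉ ks) :
    PySem.List.dedup (ks ++ [x]) = PySem.List.dedup ks ++ [x] := by
  rw [PySem.List.dedup_eq_ofList, PySem.List.dedup_eq_ofList, PySem.Set.ofList_append_singleton,
    PySem.Set.add_of_not_mem (fun hm => h ((PySem.Set.mem_ofList ks x).mp hm))]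

-- step lemmas for the four dict updates
theorem pv_ind_init (d : PySem.Dict Int Int) (ks cs : List Int) (x : Int)
    (h : pvIndInv ks cs d) (hcs : ∀ t ∈ cs, t ∈ ks) :
    pvIndInv (ks ++ [x]) cs (if (d.get? x).getD 0 == 0 then d.insert x 0 else d) := by
  obtain ⟨hk, hv⟩ := h
  have hnd : d.keys.Nodup := hk ▸ PySem.List.nodup_dedup ks
  by_cases hxk : x ∈ ks
  · have hmem : x ∈ d.keys := hk ▸ (PySem.List.mem_dedup ks x).mpr hxk
    have dEq : (if (d.get? x).getD 0 == 0 then d.insert x 0 else d) = d := by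
      split
      · next hc =>
        have hw : d.get? x = some 0 := by
          have hcon : d.contains x = true := (PySem.Dict.contains_iff_mem_keys d x).mpr hmem
          rw [PySem.Dict.contains_eq_isSome_get?] at hcon
          obtain ⟨w, hw⟩ := Option.isSome_iff_exists.mp hcon
          rw [hw]; rw [hw] at hc; simpa using hc
        exact pv_insert_eq_self d x 0 hnd hw
      · rfl
    rw [dEq]
    exact ⟨by rw [hk, pv_dedup_append_mem ks x hxk], hv⟩
  · have hmem : x ∉ d.keys := hk ▸ fun hm => hxk ((PySem.List.mem_dedup ks x).mp hm)
    have hcon : d.contains x = false := by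
      cases hcb : d.contains x
      · rfl
      · exact absurd ((PySem.Dict.contains_iff_mem_keys d x).mp hcb) hmem
    have hnone : d.get? x = none := by
      rw [PySem.Dict.contains_eq_isSome_get?] at hcon
      exact Option.not_isSome_iff_eq_none.mp (by simp [hcon])
    rw [if_pos (by rw [hnone]; rfl)]
    refine ⟨?_, ?_⟩
    · rw [PySem.Dict.keys_insert_of_not_contains d 0 hcon, hk,
        pv_dedup_append_not_mem ks x hxk]
    · intro y
      rw [PySem.Dict.getD_insert]
      split
      · next hyx =>
        subst hyx
        have : y ∉ cs := fun hyc => hxk (hcs y hyc)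
        simp [List.count_eq_zero.mpr this]
      · exact hv y

theorem pv_ind_incr (d : PySem.Dict Int Int) (ks cs : List Int) (x : Int)
    (h : pvIndInv ks cs d) (hx : x ∈ ks) :
    pvIndInv ks (cs ++ [x]) (d.modify x 0 (· + 1)) := by
  obtain ⟨hk, hv⟩ := h
  have hmem : x ∈ d.keys := hk ▸ (PySem.List.mem_dedup ks x).mpr hx
  have hcon : d.contains x = true := (PySem.Dict.contains_iff_mem_keys d x).mpr hmem
  refine ⟨?_, ?_⟩
  · rw [PySem.Dict.keys_modify, PySem.Dict.keys_insert_of_contains _ _ hcon, hk]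
  · intro y
    rw [PySem.Dict.getD_modify]
    split
    · next hyx =>
      subst hyx
      rw [hv y]
      simp [List.count_append]
    · next hyx =>
      rw [hv y]
      simp [List.count_append, Ne.symm hyx]

theorem pv_nb_init (d : PySem.Dict Int (List Int)) (ks : List Int) (es : List (Int × Int)) (x : Int)
    (h : pvNbInv ks es d) (hes : ∀ p ∈ es, p.1 ∈ ks) :
    pvNbInv (ks ++ [x]) es (if (d.get? x).getD [] == ([] : List Int) then d.insert x [] else d) := by
  obtain ⟨hk, hv⟩ := h
  have hnd : d.keys.Nodup := hk ▸ PySem.List.nodup_dedup ks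
  by_cases hxk : x ∈ ks
  · have hmem : x ∈ d.keys := hk ▸ (PySem.List.mem_dedup ks x).mpr hxk
    have dEq : (if (d.get? x).getD [] == ([] : List Int) then d.insert x [] else d) = d := by
      split
      · next hc =>
        have hw : d.get? x = some [] := by
          have hcon : d.contains x = true := (PySem.Dict.contains_iff_mem_keys d x).mpr hmem
          rw [PySem.Dict.contains_eq_isSome_get?] at hcon
          obtain ⟨w, hw⟩ := Option.isSome_iff_exists.mp hcon
          rw [hw]; rw [hw] at hc; simpa using hc
        exact pv_insert_eq_self d x [] hnd hw
      · rfl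
    rw [dEq]
    exact ⟨by rw [hk, pv_dedup_append_mem ks x hxk], hv⟩
  · have hmem : x ∉ d.keys := hk ▸ fun hm => hxk ((PySem.List.mem_dedup ks x).mp hm)
    have hcon : d.contains x = false := by
      cases hcb : d.contains x
      · rfl
      · exact absurd ((PySem.Dict.contains_iff_mem_keys d x).mp hcb) hmem
    have hnone : d.get? x = none := by
      rw [PySem.Dict.contains_eq_isSome_get?] at hcon
      exact Option.not_isSome_iff_eq_none.mp (by simp [hcon])
    rw [if_pos (by rw [hnone]; rfl)]
    refine ⟨?_, ?_⟩
    · rw [PySem.Dict.keys_insert_of_not_contains d [] hcon, hk,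
        pv_dedup_append_not_mem ks x hxk]
    · intro y
      rw [PySem.Dict.getD_insert]
      split
      · next hyx =>
        subst hyx
        have hfil : es.filter (fun p => p.1 == y) = [] :=
          List.filter_eq_nil_iff.mpr fun p hp => by
            simp only [beq_iff_eq]
            exact fun hpe => hxk (hpe ▸ hes p hp)
        simp [hfil]
      · exact hv y

theorem pv_nb_app (d : PySem.Dict Int (List Int)) (ks : List Int) (es : List (Int × Int)) (x y : Int)
    (h : pvNbInv ks es d) (hx : x ∈ ks) :
    pvNbInv ks (es ++ [(x, y)]) (d.modify x [] (· ++ [y])) := by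
  obtain ⟨hk, hv⟩ := h
  have hmem : x ∈ d.keys := hk ▸ (PySem.List.mem_dedup ks x).mpr hx
  have hcon : d.contains x = true := (PySem.Dict.contains_iff_mem_keys d x).mpr hmem
  refine ⟨?_, ?_⟩
  · rw [PySem.Dict.keys_modify, PySem.Dict.keys_insert_of_contains _ _ hcon, hk]
  · intro z
    rw [PySem.Dict.getD_modify]
    split
    · next hzx =>
      subst hzx
      rw [hv z]
      simp [List.filter_append]
    · next hzx =>
      rw [hv z]
      simp [List.filter_append, Ne.symm hzx]

theorem pv_mem_zp (s : List Int) (p : Int × Int) (h : p ∈ pvZp s) : p.1 ∈ s ∧ p.2 ∈ s := by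
  obtain ⟨h1, h2⟩ := List.of_mem_zip h
  exact ⟨h1, List.mem_of_mem_tail h2⟩

theorem pv_mem_E (ss : List (List Int)) (p : Int × Int) (h : p ∈ pvE ss) :
    p.1 ∈ ss.flatten ∧ p.2 ∈ ss.flatten := by
  obtain ⟨s, hs, hp⟩ := List.mem_flatMap.mp h
  obtain ⟨h1, h2⟩ := pv_mem_zp s p hp
  exact ⟨List.mem_flatten.mpr ⟨s, hs, h1⟩, List.mem_flatten.mpr ⟨s, hs, h2⟩⟩

theorem pv_zp_take_fst_mem (s : List Int) (k : Nat) (p : Int × Int)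
    (h : p ∈ (pvZp s).take k) : p.1 ∈ s.take k := by
  obtain ⟨j, hj, hpe⟩ := List.mem_iff_getElem.mp h
  have hlen : j < k ∧ j < (pvZp s).length := by
    simp [List.length_take] at hj; omega
  have hjz : j < (pvZp s).length := hlen.2
  have hjs : j < s.length := by
    simp [pvZp, List.length_zip, List.length_tail] at hjz; omega
  have hp1 : p.1 = s[j] := by
    rw [← hpe, List.getElem_take]
    simp [pvZp, List.getElem_zip]
  have hjt : j < (s.take k).length := by simp [List.length_take]; omega
  have : (s.take k)[j] = s[j] := List.getElem_take
  rw [hp1, ← this]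
  exact List.getElem_mem hjt

theorem pv_zp_take_snd_mem (s : List Int) (k : Nat) (p : Int × Int)
    (h : p ∈ (pvZp s).take (k - 1)) : p.2 ∈ s.take k := by
  obtain ⟨j, hj, hpe⟩ := List.mem_iff_getElem.mp h
  have hlen : j < k - 1 ∧ j < (pvZp s).length := by
    simp [List.length_take] at hj; omega
  have hjz : j < (pvZp s).length := hlen.2
  have hjs : j + 1 < s.length := by
    simp [pvZp, List.length_zip, List.length_tail] at hjz; omega
  have hp2 : p.2 = s[j + 1] := by
    rw [← hpe, List.getElem_take]
    simp [pvZp, List.getElem_zip, List.getElem_tail]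
  have hjt : j + 1 < (s.take k).length := by simp [List.length_take]; omega
  have : (s.take k)[j + 1] = s[j + 1] := List.getElem_take
  rw [hp2, ← this]
  exact List.getElem_mem hjt

-- A's inner loop over one sequence, from position k to the end
theorem pv_aLoop (seq pre csI : List Int) (esN : List (Int × Int))
    (hcs : ∀ t ∈ csI, t ∈ pre) (hes : ∀ p ∈ esN, p.1 ∈ pre) :
    ∀ (fuel k : Nat) (st : PySem.Dict Int Int × PySem.Dict Int (List Int)),
    seq.length - k = fuel → k ≤ seq.length →
    pvIndInv (pre ++ seq.take k) (csI ++ ((pvZp seq).take (k - 1)).map Prod.snd) st.1 →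
    pvNbInv (pre ++ seq.take k) (esN ++ (pvZp seq).take k) st.2 →
    (pvIndInv (pre ++ seq) (csI ++ (pvZp seq).map Prod.snd)
      ((PySem.List.pyRange (k : Int) (seq.length : Int) 1).foldl (fun st i =>
        let v := PySem.List.pyGetD seq i 0
        let ind := if (st.1.get? v).getD 0 == 0 then st.1.insert v 0 else st.1
        let ind := if 0 < i then ind.modify v 0 (· + 1) else ind
        let nb := if (st.2.get? v).getD [] == ([] : List Int) then st.2.insert v [] else st.2
        let nb := if i < (seq.length : Int) - 1 then
            nb.modify v [] (· ++ [PySem.List.pyGetD seq (i + 1) 0]) else nb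
        (ind, nb)) st).1 ∧
     pvNbInv (pre ++ seq) (esN ++ pvZp seq)
      ((PySem.List.pyRange (k : Int) (seq.length : Int) 1).foldl (fun st i =>
        let v := PySem.List.pyGetD seq i 0
        let ind := if (st.1.get? v).getD 0 == 0 then st.1.insert v 0 else st.1
        let ind := if 0 < i then ind.modify v 0 (· + 1) else ind
        let nb := if (st.2.get? v).getD [] == ([] : List Int) then st.2.insert v [] else st.2
        let nb := if i < (seq.length : Int) - 1 then
            nb.modify v [] (· ++ [PySem.List.pyGetD seq (i + 1) 0]) else nb
        (ind, nb)) st).2) := by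
  intro fuel
  induction fuel with
  | zero =>
    intro k st hfk hkle hInd hNb
    have hkl : k = seq.length := by omega
    subst hkl
    have hzlen : (pvZp seq).length = seq.length - 1 := by
      simp [pvZp, List.length_zip, List.length_tail]
    rw [PySem.List.pyRange_one_eq_nil (le_refl _)]
    simp only [List.foldl_nil]
    rw [List.take_length] at hInd hNb
    rw [List.take_of_length_le (by omega)] at hInd
    rw [List.take_of_length_le (by omega)] at hNb
    exact ⟨hInd, hNb⟩
  | succ m ih =>
    intro k st hfk hkle hInd hNb
    have hklt : k < seq.length := by omega
    have hzlen : (pvZp seq).length = seq.length - 1 := by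
      simp [pvZp, List.length_zip, List.length_tail]
    rw [PySem.List.pyRange_one_cons (by exact_mod_cast hklt), List.foldl_cons]
    have hcast : ((k : Int) + 1) = ((k + 1 : Nat) : Int) := by push_cast; ring
    rw [hcast]
    have hget : PySem.List.pyGetD seq ((k : Nat) : Int) 0 = seq[k] := by
      rw [PySem.List.pyGetD_natCast]
      exact List.getD_eq_getElem seq 0 hklt
    -- membership side conditions at stage k
    have hcsk : ∀ t ∈ csI ++ ((pvZp seq).take (k - 1)).map Prod.snd, t ∈ pre ++ seq.take k := by
      intro t ht
      rcases List.mem_append.mp ht with h1 | h1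
      · exact List.mem_append.mpr (Or.inl (hcs t h1))
      · obtain ⟨p, hp, hpe⟩ := List.mem_map.mp h1
        exact List.mem_append.mpr (Or.inr (hpe ▸ pv_zp_take_snd_mem seq k p hp))
    have hesk : ∀ p ∈ esN ++ (pvZp seq).take k, p.1 ∈ pre ++ seq.take k := by
      intro p hp
      rcases List.mem_append.mp hp with h1 | h1
      · exact List.mem_append.mpr (Or.inl (hes p h1))
      · exact List.mem_append.mpr (Or.inr (pv_zp_take_fst_mem seq k p h1))
    have htake1 : seq.take (k + 1) = seq.take k ++ [seq[k]] :=
      List.take_succ_eq_append_getElem hklt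
    refine ih (k + 1) _ (by omega) (by omega) ?_ ?_
    · -- indegree invariant at k+1
      dsimp only
      rw [hget]
      have h1 := pv_ind_init st.1 (pre ++ seq.take k)
        (csI ++ ((pvZp seq).take (k - 1)).map Prod.snd) seq[k] hInd hcsk
      rw [htake1, ← List.append_assoc]
      by_cases hk0 : 0 < k
      · rw [if_pos (show (0 : Int) < (k : Nat) by exact_mod_cast hk0)]
        have h2 := pv_ind_incr _ _ _ seq[k] h1
          (List.mem_append_right _ (List.mem_singleton_self _))
        have hkm : k - 1 < (pvZp seq).length := by omega
        have htk : (pvZp seq).take k = (pvZp seq).take (k - 1) ++ [(pvZp seq)[k - 1]] := by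
          have := List.take_succ_eq_append_getElem hkm
          rwa [Nat.sub_add_cancel (by omega)] at this
        have hsnd : (pvZp seq)[k - 1].2 = seq[k] := by
          simp only [pvZp, List.getElem_zip, List.getElem_tail]
          congr 1
          omega
        have hcseq : csI ++ ((pvZp seq).take ((k + 1) - 1)).map Prod.snd
            = (csI ++ ((pvZp seq).take (k - 1)).map Prod.snd) ++ [seq[k]] := by
          rw [Nat.add_sub_cancel, htk]
          simp only [List.map_append, List.map_cons, List.map_nil, hsnd, List.append_assoc]
        rw [hcseq]
        exact h2
      · have hk0' : k = 0 := by omega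
        rw [if_neg (show ¬ (0 : Int) < (k : Nat) by simp [hk0'])]
        subst hk0'
        exact h1
    · -- neighbor invariant at k+1
      dsimp only
      rw [hget]
      have h1 := pv_nb_init st.2 (pre ++ seq.take k)
        (esN ++ (pvZp seq).take k) seq[k] hNb hesk
      rw [htake1, ← List.append_assoc]
      by_cases hklast : k < seq.length - 1
      · rw [if_pos (show ((k : Nat) : Int) < (seq.length : Int) - 1 by
          push_cast; omega)]
        have hk1lt : k + 1 < seq.length := by omega
        have hget2 : PySem.List.pyGetD seq (((k + 1 : Nat) : Nat) : Int) 0 = seq[k + 1] := by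
          rw [PySem.List.pyGetD_natCast]
          exact List.getD_eq_getElem seq 0 hk1lt
        rw [hget2]
        have hkz : k < (pvZp seq).length := by omega
        have htk : (pvZp seq).take (k + 1) = (pvZp seq).take k ++ [(pvZp seq)[k]] :=
          List.take_succ_eq_append_getElem hkz
        have hpair : (pvZp seq)[k] = (seq[k], seq[k + 1]) := by
          simp [pvZp, List.getElem_zip, List.getElem_tail]
        have h2 := pv_nb_app _ _ _ seq[k] seq[k + 1] h1
          (List.mem_append_right _ (List.mem_singleton_self _))
        rw [htk, hpair, ← List.append_assoc]
        exact h2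
      · rw [if_neg (show ¬ ((k : Nat) : Int) < (seq.length : Int) - 1 by
          omega)]
        have htk : (pvZp seq).take (k + 1) = (pvZp seq).take k := by
          rw [List.take_of_length_le (by omega), List.take_of_length_le (by omega)]
        rw [htk]
        exact h1

-- A's outer loop
theorem pv_aOuter :
    ∀ (ss : List (List Int)) (pre cs : List Int) (es : List (Int × Int))
      (st : PySem.Dict Int Int × PySem.Dict Int (List Int)),
    (∀ t ∈ cs, t ∈ pre) → (∀ p ∈ es, p.1 ∈ pre) →
    pvIndInv pre cs st.1 → pvNbInv pre es st.2 →
    (pvIndInv (pre ++ ss.flatten) (cs ++ (pvE ss).map Prod.snd)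
      (ss.foldl (fun st seq =>
        (PySem.List.pyRange 0 (seq.length : Int) 1).foldl (fun st i =>
          let v := PySem.List.pyGetD seq i 0
          let ind := if (st.1.get? v).getD 0 == 0 then st.1.insert v 0 else st.1
          let ind := if 0 < i then ind.modify v 0 (· + 1) else ind
          let nb := if (st.2.get? v).getD [] == ([] : List Int) then st.2.insert v [] else st.2
          let nb := if i < (seq.length : Int) - 1 then
              nb.modify v [] (· ++ [PySem.List.pyGetD seq (i + 1) 0]) else nb
          (ind, nb)) st) st).1 ∧
     pvNbInv (pre ++ ss.flatten) (es ++ pvE ss)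
      (ss.foldl (fun st seq =>
        (PySem.List.pyRange 0 (seq.length : Int) 1).foldl (fun st i =>
          let v := PySem.List.pyGetD seq i 0
          let ind := if (st.1.get? v).getD 0 == 0 then st.1.insert v 0 else st.1
          let ind := if 0 < i then ind.modify v 0 (· + 1) else ind
          let nb := if (st.2.get? v).getD [] == ([] : List Int) then st.2.insert v [] else st.2
          let nb := if i < (seq.length : Int) - 1 then
              nb.modify v [] (· ++ [PySem.List.pyGetD seq (i + 1) 0]) else nb
          (ind, nb)) st) st).2) := by
  intro ss
  induction ss with
  | nil =>
    intro pre cs es st _ _ hInd hNb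
    simpa [pvE] using ⟨hInd, hNb⟩
  | cons seq ss ih =>
    intro pre cs es st hcs hes hInd hNb
    rw [List.foldl_cons]
    have h0 := pv_aLoop seq pre cs es hcs hes seq.length 0 st (by omega) (by omega)
      (by simpa using hInd) (by simpa using hNb)
    have hcs' : ∀ t ∈ cs ++ (pvZp seq).map Prod.snd, t ∈ pre ++ seq := by
      intro t ht
      rcases List.mem_append.mp ht with h1 | h1
      · exact List.mem_append.mpr (Or.inl (hcs t h1))
      · obtain ⟨p, hp, hpe⟩ := List.mem_map.mp h1
        exact List.mem_append.mpr (Or.inr (hpe ▸ (pv_mem_zp seq p hp).2))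
    have hes' : ∀ p ∈ es ++ pvZp seq, p.1 ∈ pre ++ seq := by
      intro p hp
      rcases List.mem_append.mp hp with h1 | h1
      · exact List.mem_append.mpr (Or.inl (hes p h1))
      · exact List.mem_append.mpr (Or.inr (pv_mem_zp seq p h1).1)
    have hrec := ih (pre ++ seq) (cs ++ (pvZp seq).map Prod.snd) (es ++ pvZp seq)
      _ hcs' hes' h0.1 h0.2
    have hE : pvE (seq :: ss) = pvZp seq ++ pvE ss := by simp [pvE]
    constructor
    · rw [List.flatten_cons, hE, List.map_append, ← List.append_assoc, ← List.append_assoc]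
      exact hrec.1
    · rw [List.flatten_cons, hE, ← List.append_assoc, ← List.append_assoc]
      exact hrec.2

-- B's first pass over one flat list of elements
theorem pv_bPass1 :
    ∀ (xs ks : List Int) (st : PySem.Dict Int Int × PySem.Dict Int (List Int)),
    pvIndInv ks [] st.1 → pvNbInv ks [] st.2 →
    (pvIndInv (ks ++ xs) []
      (xs.foldl (fun st x => if st.1.contains x then st
        else (st.1.insert x 0, st.2.insert x ([] : List Int))) st).1 ∧
     pvNbInv (ks ++ xs) []
      (xs.foldl (fun st x => if st.1.contains x then st
        else (st.1.insert x 0, st.2.insert x ([] : List Int))) st).2) := by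
  intro xs
  induction xs with
  | nil =>
    intro ks st hInd hNb
    simpa using ⟨hInd, hNb⟩
  | cons x xs ih =>
    intro ks st hInd hNb
    obtain ⟨hk1, hv1⟩ := hInd
    obtain ⟨hk2, hv2⟩ := hNb
    have hnd1 : st.1.keys.Nodup := hk1 ▸ PySem.List.nodup_dedup ks
    rw [List.foldl_cons]
    have hstep : pvIndInv (ks ++ [x]) []
        (if st.1.contains x then st
          else (st.1.insert x 0, st.2.insert x ([] : List Int))).1 ∧
        pvNbInv (ks ++ [x]) []
        (if st.1.contains x then st
          else (st.1.insert x 0, st.2.insert x ([] : List Int))).2 := by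
      by_cases hc : st.1.contains x = true
      · have hxk : x ∈ ks :=
          (PySem.List.mem_dedup ks x).mp (hk1 ▸ (PySem.Dict.contains_iff_mem_keys st.1 x).mp hc)
        rw [if_pos hc]
        exact ⟨⟨by rw [hk1, pv_dedup_append_mem ks x hxk], hv1⟩,
               ⟨by rw [hk2, pv_dedup_append_mem ks x hxk], hv2⟩⟩
      · have hcf : st.1.contains x = false := by simpa using hc
        have hxk : x ∉ ks := fun hm =>
          hc ((PySem.Dict.contains_iff_mem_keys st.1 x).mpr (hk1 ▸ (PySem.List.mem_dedup ks x).mpr hm))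
        have hcf2 : st.2.contains x = false := by
          cases hcb : st.2.contains x
          · rfl
          · exact absurd ((PySem.List.mem_dedup ks x).mp
              (hk2 ▸ (PySem.Dict.contains_iff_mem_keys st.2 x).mp hcb)) hxk
        rw [if_neg hc]
        refine ⟨⟨?_, ?_⟩, ⟨?_, ?_⟩⟩
        · rw [PySem.Dict.keys_insert_of_not_contains st.1 0 hcf, hk1,
            pv_dedup_append_not_mem ks x hxk]
        · intro y
          rw [PySem.Dict.getD_insert]
          split
          · simp
          · exact hv1 y
        · rw [PySem.Dict.keys_insert_of_not_contains st.2 [] hcf2, hk2,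
            pv_dedup_append_not_mem ks x hxk]
        · intro y
          rw [PySem.Dict.getD_insert]
          split
          · simp
          · exact hv2 y
    have := ih (ks ++ [x]) _ hstep.1 hstep.2
    rwa [List.append_assoc, List.singleton_append] at this

-- B's second pass as a single fold over the edge list
theorem pv_bPass2 (ks : List Int) :
    ∀ (E : List (Int × Int)) (es : List (Int × Int)) (nb : PySem.Dict Int (List Int)),
    pvNbInv ks es nb → (∀ p ∈ E, p.1 ∈ ks) →
    pvNbInv ks (es ++ E) (E.foldl (fun d p => d.modify p.1 [] (· ++ [p.2])) nb) := by
  intro E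
  induction E with
  | nil =>
    intro es nb h _
    simpa using h
  | cons p E ih =>
    intro es nb h hfst
    rw [List.foldl_cons]
    have h1 := pv_nb_app nb ks es p.1 p.2 h (hfst p (List.mem_cons_self))
    have := ih (es ++ [(p.1, p.2)]) _ h1 (fun q hq => hfst q (List.mem_cons_of_mem _ hq))
    rwa [List.append_assoc, List.singleton_append] at this

-- B's third pass as a single fold over a flat increment list
theorem pv_bPass3 (ks : List Int) :
    ∀ (L cs : List Int) (d : PySem.Dict Int Int),
    pvIndInv ks cs d → (∀ t ∈ L, t ∈ ks) →
    pvIndInv ks (cs ++ L) (L.foldl (fun d t => d.modify t 0 (· + 1)) d) := by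
  intro L
  induction L with
  | nil =>
    intro cs d h _
    simpa using h
  | cons t L ih =>
    intro cs d h hL
    rw [List.foldl_cons]
    have h1 := pv_ind_incr d ks cs t h (hL t (List.mem_cons_self))
    have := ih (cs ++ [t]) _ h1 (fun u hu => hL u (List.mem_cons_of_mem _ hu))
    rwa [List.append_assoc, List.singleton_append] at this

-- regrouping the edge list by (distinct, covering) first components is a permutation
theorem pv_group_perm :
    ∀ (E : List (Int × Int)) (K : List Int), K.Nodup → (∀ p ∈ E, p.1 ∈ K) →
    (K.flatMap (fun k => E.filter (fun p => p.1 == k))).Perm E := by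
  intro E
  induction E with
  | nil =>
    intro K _ _
    simp
  | cons p E ih =>
    intro K hnd hcov
    have hp1 : p.1 ∈ K := hcov p (List.mem_cons_self)
    obtain ⟨K1, K2, hK⟩ := List.mem_iff_append.mp hp1
    subst hK
    have hsplit := List.nodup_append.mp hnd
    have hnotK1 : p.1 ∉ K1 := fun hm => hsplit.2.2 p.1 hm p.1 List.mem_cons_self rfl
    have hnotK2 : p.1 ∉ K2 := by
      have := hsplit.2.1
      rw [List.nodup_cons] at this
      exact this.1
    have hcons : ∀ (Ks : List Int), p.1 ∉ Ks →
        Ks.flatMap (fun k => (p :: E).filter (fun q => q.1 == k))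
          = Ks.flatMap (fun k => E.filter (fun q => q.1 == k)) := by
      intro Ks hKs
      refine List.flatMap_congr fun k hk => ?_
      rw [List.filter_cons_of_neg (by simp; exact fun h => hKs (h ▸ hk))]
    have hcenter : (p :: E).filter (fun q => q.1 == p.1) = p :: E.filter (fun q => q.1 == p.1) :=
      List.filter_cons_of_pos (by simp)
    rw [List.flatMap_append, List.flatMap_cons, hcons K1 hnotK1, hcons K2 hnotK2, hcenter]
    have hihm := ih (K1 ++ p.1 :: K2) hnd
      (fun q hq => hcov q (List.mem_cons_of_mem _ hq))
    rw [List.flatMap_append, List.flatMap_cons] at hihm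
    have e1 : K1.flatMap (fun k => E.filter (fun q => q.1 == k)) ++
          ((p :: E.filter (fun q => q.1 == p.1)) ++ K2.flatMap (fun k => E.filter (fun q => q.1 == k)))
        = K1.flatMap (fun k => E.filter (fun q => q.1 == k)) ++
          p :: (E.filter (fun q => q.1 == p.1) ++ K2.flatMap (fun k => E.filter (fun q => q.1 == k))) := by
      simp
    rw [e1]
    refine List.Perm.trans List.perm_middle ?_
    exact List.Perm.cons p hihm

-- assembling the two characterisations into equality of the two result pairs
theorem pv_final (A1 indB : PySem.Dict Int Int) (A2 nbB : PySem.Dict Int (List Int))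
    (flat : List Int) (E : List (Int × Int))
    (hfst : ∀ p ∈ E, p.1 ∈ flat)
    (hA1 : pvIndInv flat (E.map Prod.snd) A1) (hA2 : pvNbInv flat E A2)
    (hB3 : pvIndInv flat (nbB.keys.flatMap (fun k => nbB.getD k [])) indB)
    (hB2 : pvNbInv flat E nbB) :
    (A1.items, A2.items) = (indB.items, nbB.items) := by
  have hknd : A1.keys.Nodup := by rw [hA1.1]; exact PySem.List.nodup_dedup flat
  have hknd2 : A2.keys.Nodup := by rw [hA2.1]; exact PySem.List.nodup_dedup flat
  have hLeq : nbB.keys.flatMap (fun k => nbB.getD k [])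
      = ((PySem.List.dedup flat).flatMap (fun k => E.filter (fun p => p.1 == k))).map Prod.snd := by
    rw [List.map_flatMap, hB2.1]
    exact List.flatMap_congr (fun k _ => hB2.2 k)
  have hperm := pv_group_perm E (PySem.List.dedup flat) (PySem.List.nodup_dedup flat)
    (fun p hp => (PySem.List.mem_dedup flat p.1).mpr (hfst p hp))
  have hindEq : A1 = indB := by
    refine pv_dict_eq_of_keys_getD A1 indB 0 hknd (hA1.1.trans hB3.1.symm) (fun x => ?_)
    rw [hA1.2 x, hB3.2 x, hLeq]
    norm_cast
    exact ((hperm.map Prod.snd).count_eq x).symm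
  have hnbEq : A2 = nbB := pv_dict_eq_of_keys_getD A2 nbB [] hknd2 (hA2.1.trans hB2.1.symm)
    (fun x => (hA2.2 x).trans (hB2.2 x).symm)
  rw [hindEq, hnbEq]

-- ===== VERDICT (by name: the statement is the Claim_ definition above) =====
theorem get_indegree_and_neighbors_spec : Claim_equal_get_indegree_and_neighbors := by
  intro n seqs _
  unfold Spec_get_indegree_and_neighbors get_indegree_and_neighbors get_indegree_and_neighbors_alt
  dsimp only
  conv_rhs => rw [← List.foldl_flatten, ← List.foldl_flatMap, ← List.foldl_flatMap]
  have hEI : pvIndInv [] [] (PySem.Dict.empty : PySem.Dict Int Int) :=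
    ⟨rfl, fun x => by simp [PySem.Dict.getD_empty]⟩
  have hEN : pvNbInv [] [] (PySem.Dict.empty : PySem.Dict Int (List Int)) :=
    ⟨rfl, fun x => by simp [PySem.Dict.getD_empty]⟩
  have hA := pv_aOuter seqs [] [] [] (PySem.Dict.empty, PySem.Dict.empty)
    (by simp) (by simp) hEI hEN
  simp only [List.nil_append] at hA
  have hB1 := pv_bPass1 seqs.flatten [] (PySem.Dict.empty, PySem.Dict.empty) hEI hEN
  simp only [List.nil_append] at hB1
  have hfst : ∀ p ∈ pvE seqs, p.1 ∈ seqs.flatten := fun p hp => (pv_mem_E seqs p hp).1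
  have hB2 := pv_bPass2 seqs.flatten (pvE seqs) [] _ hB1.2 hfst
  simp only [List.nil_append] at hB2
  have hL : ∀ t ∈ (List.foldl (fun d p => d.modify p.1 [] (· ++ [p.2]))
      (seqs.flatten.foldl (fun st x => if st.1.contains x then st
        else (st.1.insert x 0, st.2.insert x ([] : List Int)))
        ((PySem.Dict.empty : PySem.Dict Int Int),
         (PySem.Dict.empty : PySem.Dict Int (List Int)))).2 (pvE seqs)).keys.flatMap
      (fun k => (List.foldl (fun d p => d.modify p.1 [] (· ++ [p.2]))
      (seqs.flatten.foldl (fun st x => if st.1.contains x then st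
        else (st.1.insert x 0, st.2.insert x ([] : List Int)))
        ((PySem.Dict.empty : PySem.Dict Int Int),
         (PySem.Dict.empty : PySem.Dict Int (List Int)))).2 (pvE seqs)).getD k []),
      t ∈ seqs.flatten := by
    intro t ht
    obtain ⟨k, hk, htk⟩ := List.mem_flatMap.mp ht
    rw [hB2.2 k] at htk
    obtain ⟨p, hp, hpe⟩ := List.mem_map.mp htk
    exact hpe ▸ (pv_mem_E seqs p (List.mem_filter.mp hp).1).2
  have hB3 := pv_bPass3 seqs.flatten _ [] _ hB1.1 hL
  simp only [List.nil_append] at hB3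
  exact pv_final _ _ _ _ seqs.flatten (pvE seqs) hfst hA.1 hA.2 hB3 hB2
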